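-- pv_equiv track=rewrite | github.com/mercadoalex/TwinSpark-Chronicles | backend/app/agents/orchestrator.py | _extract_dialogues
-- ===== SOURCE A (Python) =====
-- from typing import Dict, Optional, List
--
-- def _extract_dialogues(text: str) -> List[Dict]:
--     """Extract character dialogues from story text"""
--     dialogues = []
--
--     # Simple quoted text extraction
--     if '"' in text:
--         parts = text.split('"')
--         for i in range(1, len(parts), 2):
--             if parts[i].strip():
--                 dialogues.append({
--                     "character": "character",
--                     "text": parts[i].strip(),
--                     "emotion": "neutral"
--                 })
--
--     return dialogues
-- ===== SOURCE B (Python) =====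
-- from typing import Dict, List
--
-- def _extract_dialogues(text: str) -> List[Dict]:
--     """Extract character dialogues from story text (single-pass character scan)."""
--     dialogues = []
--     in_quote = False
--     buf = []
--     for ch in text:
--         if ch == '"':
--             if in_quote:
--                 seg = ''.join(buf).strip()
--                 if seg:
--                     dialogues.append({
--                         "character": "character",
--                         "text": seg,
--                         "emotion": "neutral"
--                     })
--                 buf = []
--             in_quote = not in_quote
--         elif in_quote:
--             buf.append(ch)
--     if in_quote:
--         seg = ''.join(buf).strip()
--         if seg:
--             dialogues.append({
--                 "character": "character",
--                 "text": seg,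
--                 "emotion": "neutral"
--             })
--     return dialogues
-- ===== Notes on version B (the rewrite author's own statement) =====
-- stated objective: alternative
-- what changed: Replaces the split-on-quote plus odd-index range loop over the parts list with a single character-by-character scan maintaining an in_quote flag and a segment buffer, flushing the trailing buffer at EOF so an unterminated quote's content is still kept.
import Mathlib
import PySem

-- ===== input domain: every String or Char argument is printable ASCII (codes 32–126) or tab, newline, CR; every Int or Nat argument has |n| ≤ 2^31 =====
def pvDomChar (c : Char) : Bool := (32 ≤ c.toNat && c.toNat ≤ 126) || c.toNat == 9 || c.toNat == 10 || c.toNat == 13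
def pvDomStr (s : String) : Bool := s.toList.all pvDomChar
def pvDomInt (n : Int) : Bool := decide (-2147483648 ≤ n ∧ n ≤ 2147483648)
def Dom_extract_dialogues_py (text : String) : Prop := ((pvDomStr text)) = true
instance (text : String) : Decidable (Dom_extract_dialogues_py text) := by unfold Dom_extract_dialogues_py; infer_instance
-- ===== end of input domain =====

-- B replaces A's split-on-quote-then-odd-index-loop by a single character scan with an in_quote flag and a buffer; alternative decomposition, same results.


-- ===== PORT A =====
-- literal port of A: the split on the quote character is Str.split? (never none: the separator is nonempty), then the range(1, len(parts), 2) loop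
def extract_dialogues_py (text : String) : List (List (String × String)) :=
  let dialogues : List (List (String × String)) := []
  if PySem.Str.isIn "\"" text then
    let parts : List String := (PySem.Str.split? text "\"").getD []
    (PySem.List.pyRange 1 (parts.length : Int) 2).foldl (fun acc i =>
      if PySem.Str.strip (PySem.List.pyGetD parts i "") ≠ "" then
        acc ++ [[("character", "character"),
                 ("text", PySem.Str.strip (PySem.List.pyGetD parts i "")),
                 ("emotion", "neutral")]]
      else acc) dialogues
  else dialogues

-- ===== PORT B =====
-- the flush of Source B: strip the buffer, append the dialogue dict if non-empty; then the character loop (state: in_quote, buf, dialogues)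
def pvFlush (buf : List Char) (out : List (List (String × String))) :
    List (List (String × String)) :=
  let seg := PySem.Chars.strip buf
  if seg ≠ [] then
    out ++ [[("character", "character"), ("text", String.ofList seg), ("emotion", "neutral")]]
  else out

def pvScan (inq : Bool) (buf : List Char) (out : List (List (String × String))) :
    List Char → List (List (String × String))
  | [] => if inq then pvFlush buf out else out
  | c :: rest =>
    if c = '"' then
      if inq then pvScan false [] (pvFlush buf out) rest
      else pvScan true buf out rest
    else if inq then pvScan inq (buf ++ [c]) out rest
    else pvScan inq buf out rest


def extract_dialogues_py_alt (text : String) : List (List (String × String)) :=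
  pvScan false [] [] text.toList


-- ===== PRECONDITION & SPEC =====
def Spec_extract_dialogues_py (text : String) (out : List (List (String × String))) : Prop := out = extract_dialogues_py_alt text
instance (text : String) (out : List (List (String × String))) : Decidable (Spec_extract_dialogues_py text out) := by unfold Spec_extract_dialogues_py; infer_instance

-- ===== CLAIM (what is proved, stated in full; the proofs are below) =====
def Claim_equal_extract_dialogues_py : Prop := ∀ (text : String), Dom_extract_dialogues_py text → Spec_extract_dialogues_py text (extract_dialogues_py text)

-- ===== LEMMAS AND PROOFS =====

def splitQ : List Char → List (List Char)
  | [] => [[]]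
  | c :: rest => if c = '"' then [] :: splitQ rest else (splitQ rest).modifyHead (c :: ·)

def collectQ {α : Type} : Bool → List α → List α
  | _, [] => []
  | true, p :: ps => p :: collectQ false ps
  | false, _ :: ps => collectQ true ps

def mkD (s : List Char) : List (String × String) :=
  [("character", "character"), ("text", String.ofList s), ("emotion", "neutral")]

def emitQ (ps : List (List Char)) : List (List (String × String)) :=
  ((ps.map PySem.Chars.strip).filter (· ≠ [])).map mkD

theorem emitQ_nil : emitQ [] = [] := rfl

theorem emitQ_cons (a : List Char) (l : List (List Char)) :
    emitQ (a :: l) = (if PySem.Chars.strip a ≠ [] then [mkD (PySem.Chars.strip a)] else []) ++ emitQ l := by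
  simp only [emitQ, List.map_cons, List.filter_cons]
  split_ifs with h <;> simp_all

theorem go_eq : ∀ (fuel : Nat) (cs cur : List Char) (acc : List (List Char)),
    cs.length < fuel →
    PySem.Chars.splitOn.go ['"'] fuel cs cur acc =
      acc.reverse ++ (splitQ cs).modifyHead (cur.reverse ++ ·)
  | fuel + 1, [], cur, acc, _ => by
    rw [PySem.Chars.splitOn.go.eq_def]
    simp [splitQ]
  | fuel + 1, c :: rest, cur, acc, h => by
    rw [PySem.Chars.splitOn.go.eq_def]
    simp only [List.isPrefixOf, List.isPrefixOf_nil_left, Bool.and_true]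
    by_cases hc : c = '"'
    · subst hc
      simp only [beq_self_eq_true, if_pos, List.length_cons, List.drop_succ_cons, List.drop_zero, List.length_singleton]
      rw [show List.drop ([] : List Char).length rest = rest from rfl]
      rw [go_eq fuel rest [] ((cur.reverse) :: acc) (by simpa using h)]
      simp only [splitQ, if_pos rfl, List.reverse_cons, List.modifyHead_cons, List.reverse_nil,
        List.nil_append, List.append_assoc, List.cons_append]
      cases splitQ rest <;> simp
    · rw [if_neg (by simp; exact fun hh => hc hh.symm)]
      rw [go_eq fuel rest (c :: cur) acc (by simpa using h)]
      simp only [splitQ, if_neg hc]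
      rw [List.modifyHead_modifyHead]
      congr 1
      cases hs : splitQ rest with
      | nil => rfl
      | cons a l => simp

theorem splitOn_eq (cs : List Char) : PySem.Chars.splitOn cs ['"'] = splitQ cs := by
  rw [PySem.Chars.splitOn, go_eq (cs.length + 1) cs [] [] (Nat.lt_succ_self _)]
  cases hs : splitQ cs with
  | nil => simp
  | cons a l => simp

theorem collectQ_false_modifyHead {α : Type} (f : α → α) (ps : List α) :
    collectQ false (ps.modifyHead f) = collectQ false ps := by
  cases ps <;> rfl

theorem collectQ_map {α β : Type} (f : α → β) :
    ∀ (b : Bool) (ps : List α), collectQ b (ps.map f) = (collectQ b ps).map f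
  | _, [] => by cases ‹Bool› <;> rfl
  | true, p :: ps => by simp [collectQ, collectQ_map f false ps]
  | false, p :: ps => by simp [collectQ, collectQ_map f true ps]

theorem splitQ_no_quote (cs : List Char) (h : '"' ∉ cs) : splitQ cs = [cs] := by
  induction cs with
  | nil => rfl
  | cons c rest ih =>
    simp only [List.mem_cons, not_or] at h
    have hc : ¬ c = '"' := fun hh => h.1 hh.symm
    simp [splitQ, hc, ih h.2, List.modifyHead]

theorem pyGetD_cons2 {α : Type} (x y : α) (xs : List α) (i : Int) (d : α) (h : 0 ≤ i) :
    PySem.List.pyGetD (x :: y :: xs) (i + 2) d = PySem.List.pyGetD xs i d := by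
  obtain ⟨n, rfl⟩ := Int.eq_ofNat_of_zero_le h
  rw [show ((n : Int) + 2) = ((n + 2 : Nat) : Int) by push_cast; ring]
  rw [PySem.List.pyGetD_natCast, PySem.List.pyGetD_natCast]
  rfl

theorem pyRange2_cons (n : Nat) :
    PySem.List.pyRange 1 ((n : Int) + 2) 2 = 1 :: (PySem.List.pyRange 1 (n : Int) 2).map (· + 2) := by
  rw [PySem.List.pyRange_of_pos _ _ (by norm_num), PySem.List.pyRange_of_pos _ _ (by norm_num)]
  have h1 : (1 : Int) < (n : Int) + 2 := by omega
  rw [if_pos h1]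
  have hcount : (((n : Int) + 2 - 1 + 2 - 1) / 2).toNat = (if (1:Int) < n then (((n : Int) - 1 + 2 - 1) / 2).toNat else 0) + 1 := by
    split_ifs with h2
    · omega
    · omega
  rw [hcount, List.range_succ_eq_map]
  have : ∀ (t : Nat), List.map (fun k : Nat => (1:Int) + 2 * k) (0 :: (List.range t).map Nat.succ) = 1 :: (List.map (fun k : Nat => (1:Int) + 2 * k) (List.range t)).map (· + 2) := by
    intro t
    simp only [List.map_cons, List.map_map, Nat.cast_zero]
    refine congrArg₂ _ (by norm_num) (List.map_congr_left ?_)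
    intro k _
    simp [Nat.succ_eq_add_one]
    push_cast
    ring
  exact this _

theorem odd_map {α : Type} : ∀ (ps : List α) (d : α),
    (PySem.List.pyRange 1 (ps.length : Int) 2).map (fun i => PySem.List.pyGetD ps i d) =
      collectQ false ps
  | [], d => by
    simp only [List.length_nil, Nat.cast_zero]
    rw [show PySem.List.pyRange 1 0 2 = [] from by decide]
    rfl
  | [p], d => by
    simp only [List.length_cons, List.length_nil]
    rw [show ((1 : Nat) : Int) = (1 : Int) by norm_num]
    rw [show PySem.List.pyRange 1 1 2 = [] by decide]
    rfl
  | p0 :: p1 :: rest, d => by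
    have hl : ((p0 :: p1 :: rest).length : Int) = (rest.length : Int) + 2 := by
      simp; push_cast; ring
    rw [hl, pyRange2_cons]
    simp only [List.map_cons, List.map_map]
    have h1 : PySem.List.pyGetD (p0 :: p1 :: rest) 1 d = p1 := by
      rw [show (1 : Int) = ((1 : Nat) : Int) by norm_num, PySem.List.pyGetD_natCast]
      rfl
    have h2 : List.map ((fun i => PySem.List.pyGetD (p0 :: p1 :: rest) i d) ∘ (· + 2))
        (PySem.List.pyRange 1 (rest.length : Int) 2) =
        List.map (fun i => PySem.List.pyGetD rest i d) (PySem.List.pyRange 1 (rest.length : Int) 2) := by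
      apply List.map_congr_left
      intro i hi
      have hmem := (PySem.List.mem_pyRange_iff_of_pos (by norm_num) i).mp hi
      exact pyGetD_cons2 p0 p1 rest i d (by omega)
    rw [h1, h2, odd_map rest d]
    rfl

theorem pvFlush_eq (buf : List Char) (out : List (List (String × String))) :
    pvFlush buf out = out ++ emitQ [buf] := by
  by_cases h : PySem.Chars.strip buf = [] <;>
    simp [pvFlush, emitQ, List.filter, h, mkD]

theorem modifyHead_nil_append (ps : List (List Char)) :
    ps.modifyHead (([] : List Char) ++ ·) = ps := by
  cases ps <;> simp

theorem scan_spec : ∀ (cs : List Char),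
    (∀ out, pvScan false [] out cs = out ++ emitQ (collectQ false (splitQ cs))) ∧
    (∀ buf out, pvScan true buf out cs =
      out ++ emitQ (collectQ true ((splitQ cs).modifyHead (buf ++ ·)))) := by
  intro cs
  induction cs with
  | nil =>
    constructor
    · intro out; simp [pvScan, splitQ, collectQ, emitQ]
    · intro buf out
      simp only [pvScan, if_pos, splitQ, List.modifyHead_cons, List.append_nil, collectQ]
      rw [pvFlush_eq]
  | cons c rest ih =>
    by_cases hc : c = '"'
    · subst hc
      constructor
      · intro out
        rw [show pvScan false [] out ('"' :: rest) = pvScan true [] out rest from by simp [pvScan]]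
        rw [ih.2 [] out, modifyHead_nil_append]
        simp [splitQ, collectQ]
      · intro buf out
        rw [show pvScan true buf out ('"' :: rest) = pvScan false [] (pvFlush buf out) rest from by
          simp [pvScan]]
        rw [ih.1 (pvFlush buf out), pvFlush_eq]
        simp [splitQ, collectQ, emitQ_cons, emitQ_nil, List.append_assoc]
    · constructor
      · intro out
        rw [show pvScan false [] out (c :: rest) = pvScan false [] out rest from by
          simp [pvScan, hc]]
        rw [ih.1 out]
        simp only [splitQ, if_neg hc]
        rw [collectQ_false_modifyHead]
      · intro buf out
        rw [show pvScan true buf out (c :: rest) = pvScan true (buf ++ [c]) out rest from by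
          simp [pvScan, hc]]
        rw [ih.2 (buf ++ [c]) out]
        simp only [splitQ, if_neg hc, List.modifyHead_modifyHead]
        have : (fun x => buf ++ x) ∘ (fun x => c :: x) = fun x => (buf ++ [c]) ++ x := by
          funext x; simp
        rw [this]

theorem strip_ofList (u : List Char) :
    PySem.Str.strip (String.ofList u) = String.ofList (PySem.Chars.strip u) := by
  rw [PySem.Str.strip, String.toList_ofList]

theorem emitA_eq : ∀ (Q : List (List Char)),
    (((Q.map String.ofList).filter (fun s => decide (PySem.Str.strip s ≠ ""))).map
      (fun s => [("character", "character"), ("text", PySem.Str.strip s), ("emotion", "neutral")])) = emitQ Q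
  | [] => rfl
  | u :: Q => by
    have hs := strip_ofList u
    have key : PySem.Str.strip (String.ofList u) = "" ↔ PySem.Chars.strip u = [] := by
      rw [hs]
      constructor
      · intro hh; simpa using congrArg String.toList hh
      · intro hh; rw [hh]
    simp only [List.map_cons, List.filter_cons, emitQ_cons]
    by_cases h : PySem.Chars.strip u = []
    · rw [if_neg (by simpa using key.mpr h), emitA_eq Q]
      simp [h]
    · rw [if_pos (by simp only [ne_eq, decide_eq_true_eq]; exact fun hh => h (key.mp hh)),
        List.map_cons, emitA_eq Q]
      simp [h, mkD, hs]

theorem main_eq (text : String) : extract_dialogues_py text = extract_dialogues_py_alt text := by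
  rw [extract_dialogues_py, extract_dialogues_py_alt, (scan_spec text.toList).1 []]
  simp only [List.nil_append]
  by_cases hin : PySem.Str.isIn "\"" text = true
  · rw [if_pos hin]
    have hsplit : (PySem.Str.split? text "\"").getD [] = (splitQ text.toList).map String.ofList := by
      rw [PySem.Str.split?, PySem.Chars.split?]
      rw [show ("\"" : String).toList = ['"'] from rfl]
      rw [if_neg (by simp)]
      simp [splitOn_eq]
    rw [hsplit]
    rw [← List.foldl_map (f := fun i => PySem.List.pyGetD ((splitQ text.toList).map String.ofList) i "")
        (g := fun acc s => if PySem.Str.strip s ≠ "" then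
          acc ++ [[("character", "character"), ("text", PySem.Str.strip s), ("emotion", "neutral")]] else acc)]
    rw [odd_map ((splitQ text.toList).map String.ofList) ""]
    rw [PySem.List.foldl_append_ite (p := fun s => PySem.Str.strip s ≠ "")
        (f := fun s => [("character", "character"), ("text", PySem.Str.strip s), ("emotion", "neutral")])]
    rw [List.nil_append, collectQ_map, emitA_eq]
  · rw [if_neg hin]
    have hq : '"' ∉ text.toList := by
      intro hmem
      apply hin
      rw [PySem.Str.isIn_iff_infix]
      rw [show ("\"" : String).toList = ['"'] from rfl]
      exact (List.singleton_infix_iff _ _).mpr hmem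
    rw [splitQ_no_quote _ hq]
    rfl

-- ===== VERDICT (by name: the statement is the Claim_ definition above) =====
theorem extract_dialogues_py_spec : Claim_equal_extract_dialogues_py := by
  intro text _
  unfold Spec_extract_dialogues_py
  exact main_eq text
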